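-- pv_equiv track=rewrite | github.com/NTKTien/CSP | CSP.py | to_numeric
-- ===== SOURCE A (Python) =====
-- def to_numeric(str, assignment):
--     number = 0
--     for char in str:
--         if char in assignment:
--             number = number * 10 + assignment[char]
--         else:
--             return None
--     return number
-- ===== SOURCE B (Python) =====
-- def to_numeric(str, assignment):
--     # two-pass: materialise the digit list, then a positional weighted sum
--     digits = []
--     for char in str:
--         if char not in assignment:
--             return None
--         digits.append(assignment[char])
--     total = 0
--     for i, d in enumerate(reversed(digits)):
--         total += d * 10 ** i
--     return total
-- ===== Notes on version B (the rewrite author's own statement) =====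
-- stated objective: alternative
-- what changed: A folds a single Horner accumulator (number*10+digit) with an early return inside the loop; B first materialises the full digit list (None on the first missing char) and then, in a separate pass, reconstructs the value as a positional weighted sum digit*10**i over the reversed list.
import Mathlib
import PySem

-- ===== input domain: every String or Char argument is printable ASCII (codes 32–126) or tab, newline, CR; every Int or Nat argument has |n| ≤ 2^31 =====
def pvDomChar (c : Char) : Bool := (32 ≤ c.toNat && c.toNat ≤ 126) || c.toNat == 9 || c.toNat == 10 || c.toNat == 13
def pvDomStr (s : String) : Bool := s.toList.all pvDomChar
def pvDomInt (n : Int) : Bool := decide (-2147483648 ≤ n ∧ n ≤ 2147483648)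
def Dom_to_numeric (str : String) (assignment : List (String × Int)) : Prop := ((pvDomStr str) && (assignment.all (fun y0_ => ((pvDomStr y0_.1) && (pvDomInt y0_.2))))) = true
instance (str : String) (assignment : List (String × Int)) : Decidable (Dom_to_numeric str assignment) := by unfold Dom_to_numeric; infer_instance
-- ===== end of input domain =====

-- B replaces A's single Horner fold with two passes: collect the digit list, then a positional
-- weighted sum over the reversed list (objective: alternative decomposition, same cost).

-- ===== PORT A =====
-- A's loop: Horner accumulator with early return None on a missing char.
def toNumericGoA (a : PySem.Dict String Int) : List Char → Int → Option Int
  | [], number => some number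
  | c :: cs, number =>
    match a.get? (String.mk [c]) with
    | some v => toNumericGoA a cs (number * 10 + v)
    | none => none

def to_numeric (str : String) (assignment : List (String × Int)) : Option Int :=
  toNumericGoA (PySem.Dict.ofList assignment) str.toList 0

-- ===== PORT B =====
-- B's first loop: build the list of digits, None on the first missing char.
def digitsOfB (a : PySem.Dict String Int) : List Char → Option (List Int)
  | [] => some []
  | c :: cs =>
    match a.get? (String.mk [c]) with
    | none => none
    | some v => (digitsOfB a cs).map (v :: ·)

-- B's second loop: total += d * 10**i over enumerate(reversed(digits)).
def weightedSumB : List Int → Nat → Int → Int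
  | [], _, total => total
  | d :: rest, i, total => weightedSumB rest (i + 1) (total + d * 10 ^ i)

def to_numeric_alt (str : String) (assignment : List (String × Int)) : Option Int :=
  match digitsOfB (PySem.Dict.ofList assignment) str.toList with
  | none => none
  | some ds => some (weightedSumB ds.reverse 0 0)

-- ===== PRECONDITION & SPEC =====
def Spec_to_numeric (str : String) (assignment : List (String × Int)) (out : Option Int) : Prop := out = to_numeric_alt str assignment
instance (str : String) (assignment : List (String × Int)) (out : Option Int) : Decidable (Spec_to_numeric str assignment out) := by unfold Spec_to_numeric; infer_instance

-- ===== CLAIM (what is proved, stated in full; the proofs are below) =====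
def Claim_equal_to_numeric : Prop := ∀ (str : String) (assignment : List (String × Int)), Dom_to_numeric str assignment → Spec_to_numeric str assignment (to_numeric str assignment)

-- ===== LEMMAS AND PROOFS =====

theorem weightedSumB_append (xs : List Int) (d : Int) : ∀ (i : Nat) (t : Int),
    weightedSumB (xs ++ [d]) i t = weightedSumB xs i t + d * 10 ^ (i + xs.length) := by
  induction xs with
  | nil => intro i t; simp [weightedSumB]
  | cons x rest ih =>
      intro i t
      simp only [List.cons_append, weightedSumB, ih, List.length_cons]
      ring_nf

-- A's Horner fold on a fully-resolved digit list equals B's weighted sum of the reversed list.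
theorem horner_eq_weighted (ds : List Int) : ∀ (n : Int),
    ds.foldl (fun acc d => acc * 10 + d) n = n * 10 ^ ds.length + weightedSumB ds.reverse 0 0 := by
  induction ds with
  | nil => intro n; simp [weightedSumB]
  | cons d rest ih =>
      intro n
      simp only [List.foldl_cons, ih, List.reverse_cons, weightedSumB_append,
        List.length_reverse, List.length_cons]
      ring

-- A's loop equals: resolve the digits (B's first pass), then Horner-fold them.
theorem goA_eq_digits (a : PySem.Dict String Int) (cs : List Char) : ∀ (n : Int),
    toNumericGoA a cs n = (digitsOfB a cs).map (fun ds => ds.foldl (fun acc d => acc * 10 + d) n) := by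
  induction cs with
  | nil => intro n; simp [toNumericGoA, digitsOfB]
  | cons c rest ih =>
      intro n
      simp only [toNumericGoA, digitsOfB]
      cases h : a.get? (String.mk [c]) with
      | none => simp
      | some v =>
          simp only [ih (n * 10 + v), Option.map_map]
          cases digitsOfB a rest <;> simp [List.foldl_cons]

-- ===== VERDICT (by name: the statement is the Claim_ definition above) =====
theorem to_numeric_spec : Claim_equal_to_numeric := by
  intro str assignment _
  unfold Spec_to_numeric to_numeric to_numeric_alt
  rw [goA_eq_digits]
  cases h : digitsOfB (PySem.Dict.ofList assignment) str.toList with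
  | none => simp
  | some ds => simp [horner_eq_weighted]
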